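-- pv_equiv track=rewrite | github.com/BrnA122/LFP_Proyecto2_202001086 | Analizador/Analizador.py | armar_palabra
-- ===== SOURCE A (Python) =====
-- def armar_palabra(lexema):
--     estado = 0
--     valido = [1]
--
--     for char in lexema:
--         if estado == 0:
--             if char.isalpha():
--                 estado = 1
--             else:
--                 estado = -5
--         elif estado == 1:
--             if char.isalpha() or char.isdigit():
--                 estado = 1
--             else:
--                 estado = -5
--
--     if estado in valido:
--         return True
--     else:
--         return False
-- ===== SOURCE B (Python) =====
-- def armar_palabra(lexema):
--     if not lexema:
--         return False
--     return lexema[0].isalpha() and all(c.isalpha() or c.isdigit() for c in lexema[1:])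
-- ===== Notes on version B (the rewrite author's own statement) =====
-- stated objective: simpler
-- what changed: Replaced the explicit DFA state loop with a direct predicate: first char isalpha and every remaining char isalpha-or-isdigit via all(), no state variable.
import Mathlib
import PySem

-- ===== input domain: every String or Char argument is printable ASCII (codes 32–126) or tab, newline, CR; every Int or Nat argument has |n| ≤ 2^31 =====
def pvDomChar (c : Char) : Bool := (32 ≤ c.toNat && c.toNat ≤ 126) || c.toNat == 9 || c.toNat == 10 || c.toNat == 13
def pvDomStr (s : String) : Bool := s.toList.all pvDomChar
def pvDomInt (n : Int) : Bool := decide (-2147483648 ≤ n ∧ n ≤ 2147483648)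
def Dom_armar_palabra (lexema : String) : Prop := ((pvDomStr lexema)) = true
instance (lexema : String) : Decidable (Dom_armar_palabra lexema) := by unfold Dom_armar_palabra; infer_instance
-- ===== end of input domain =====

-- B replaces A's DFA state loop with a direct predicate (first char alpha, rest alpha-or-digit); same values, objective: simpler.

-- ===== PORT A =====
-- the DFA transition of A's loop body, on state estado and character char
def armar_palabra_step (estado : Int) (char : Char) : Int :=
  if estado = 0 then (if PySem.Chars.isalpha char then 1 else -5)
  else if estado = 1 then (if PySem.Chars.isalpha char || PySem.Chars.isdigit char then 1 else -5)
  else estado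

def armar_palabra (lexema : String) : Bool :=
  let estado : Int := 0
  let valido : List Int := [1]
  let estado := lexema.toList.foldl armar_palabra_step estado
  if estado ∈ valido then true else false

-- ===== PORT B =====
def armar_palabra_alt (lexema : String) : Bool :=
  match lexema.toList with
  | [] => false
  | c :: rest => PySem.Chars.isalpha c && rest.all (fun x => PySem.Chars.isalpha x || PySem.Chars.isdigit x)

-- ===== PRECONDITION & SPEC =====
def Spec_armar_palabra (lexema : String) (out : Bool) : Prop := out = armar_palabra_alt lexema
instance (lexema : String) (out : Bool) : Decidable (Spec_armar_palabra lexema out) := by unfold Spec_armar_palabra; infer_instance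

-- ===== CLAIM (what is proved, stated in full; the proofs are below) =====
def Claim_equal_armar_palabra : Prop := ∀ (lexema : String), Dom_armar_palabra lexema → Spec_armar_palabra lexema (armar_palabra lexema)

-- ===== LEMMAS AND PROOFS =====
-- the dead state -5 is absorbing
theorem armar_palabra_foldl_dead (l : List Char) :
    l.foldl armar_palabra_step (-5) = -5 := by
  induction l with
  | nil => rfl
  | cons c l ih => simpa [armar_palabra_step] using ih

-- from the accepting state 1, the fold accepts iff every char is alpha-or-digit
theorem armar_palabra_foldl_one (l : List Char) :
    l.foldl armar_palabra_step 1
      = (if l.all (fun x => PySem.Chars.isalpha x || PySem.Chars.isdigit x) then 1 else -5) := by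
  induction l with
  | nil => rfl
  | cons c l ih =>
    by_cases h : (PySem.Chars.isalpha c || PySem.Chars.isdigit c) = true
    · simp [armar_palabra_step, h, ih]
    · simp [armar_palabra_step, h, armar_palabra_foldl_dead]

-- ===== VERDICT (by name: the statement is the Claim_ definition above) =====
theorem armar_palabra_spec : Claim_equal_armar_palabra := by
  intro lexema _
  unfold Spec_armar_palabra armar_palabra armar_palabra_alt
  cases hl : lexema.toList with
  | nil => simp
  | cons c rest =>
    by_cases ha : PySem.Chars.isalpha c = true
    · by_cases hr : rest.all (fun x => PySem.Chars.isalpha x || PySem.Chars.isdigit x) = true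
      · simp [armar_palabra_step, ha, hr, armar_palabra_foldl_one]
      · simp [armar_palabra_step, ha, hr, armar_palabra_foldl_one]
    · simp [armar_palabra_step, ha, armar_palabra_foldl_dead]
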